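-- pv_equiv track=rewrite | github.com/nyan-dot/wiki-cli | src/wiki_cli/arxiv.py | split_tabular_row
-- ===== SOURCE A (Python) =====
-- def split_tabular_row(row_chunk: str) -> list[str]:
--     cells: list[str] = []
--     current: list[str] = []
--
--     for index, character in enumerate(row_chunk):
--         if character == "&" and (index == 0 or row_chunk[index - 1] != "\\"):
--             cells.append("".join(current))
--             current = []
--             continue
--         current.append(character)
--
--     cells.append("".join(current))
--     return cells
-- ===== SOURCE B (Python) =====
-- def split_tabular_row(row_chunk: str) -> list[str]:
--     parts = row_chunk.split("&")
--     cells = [parts[0]]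
--     for part in parts[1:]:
--         if cells[-1].endswith("\\"):
--             cells[-1] += "&" + part
--         else:
--             cells.append(part)
--     return cells
-- ===== Notes on version B (the rewrite author's own statement) =====
-- stated objective: faster
-- what changed: Replaces the per-character scan with index-based escape tests by splitting the row on the ampersand separator (str.split) followed by one merge pass that rejoins pieces whose predecessor cell ends in a backslash.
import Mathlib
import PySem

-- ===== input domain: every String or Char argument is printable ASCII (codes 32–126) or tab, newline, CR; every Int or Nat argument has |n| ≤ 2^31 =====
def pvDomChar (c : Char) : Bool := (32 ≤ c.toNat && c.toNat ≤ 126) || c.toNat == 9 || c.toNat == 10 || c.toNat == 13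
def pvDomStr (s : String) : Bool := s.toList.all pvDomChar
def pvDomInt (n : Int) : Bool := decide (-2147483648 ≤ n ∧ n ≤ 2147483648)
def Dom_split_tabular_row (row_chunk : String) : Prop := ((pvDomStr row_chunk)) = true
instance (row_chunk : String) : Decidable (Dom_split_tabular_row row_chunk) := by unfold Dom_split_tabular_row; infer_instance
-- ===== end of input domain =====

-- B replaces A's per-character scan (index-based escape test, manual cell accumulation) by
-- splitting on the ampersand and re-merging the pieces whose predecessor ends in a backslash.

-- ===== PORT A =====
-- loop body: 'if character == "&" and (index == 0 or row_chunk[index-1] != "\\"): cells.append("".join(current)); current = [] ; continue / current.append(character)'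
def pvStepA (cs : List Char) (st : List String × List Char) (ic : Int × Char) : List String × List Char :=
  if ic.2 = '&' ∧ (ic.1 = 0 ∨ PySem.List.pyGet? cs (ic.1 - 1) ≠ some '\\')
  then (st.1 ++ [String.ofList st.2], [])
  else (st.1, st.2 ++ [ic.2])

def split_tabular_row (row_chunk : String) : List String :=
  let cs := row_chunk.toList
  let st := (PySem.List.enumerate cs 0).foldl (pvStepA cs) ([], [])
  st.1 ++ [String.ofList st.2]

-- ===== PORT B =====
-- loop body: 'if cells[-1].endswith("\\"): cells[-1] += "&" + part / else: cells.append(part)'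
def pvMergeStep (cells : List (List Char)) (part : List Char) : List (List Char) :=
  if PySem.Chars.endswith (cells.getLastD []) ['\\']
  then cells.dropLast ++ [cells.getLastD [] ++ '&' :: part]
  else cells ++ [part]

def split_tabular_row_alt (row_chunk : String) : List String :=
  -- parts = row_chunk.split("&")  (single-character separator: List.splitOn)
  match row_chunk.toList.splitOn '&' with
  | [] => []  -- unreachable: str.split never returns an empty list
  | p0 :: rest => (List.foldl pvMergeStep [p0] rest).map String.ofList

-- ===== PRECONDITION & SPEC =====
def Spec_split_tabular_row (row_chunk : String) (out : List String) : Prop := out = split_tabular_row_alt row_chunk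
instance (row_chunk : String) (out : List String) : Decidable (Spec_split_tabular_row row_chunk out) := by unfold Spec_split_tabular_row; infer_instance

-- ===== CLAIM (what is proved, stated in full; the proofs are below) =====
def Claim_equal_split_tabular_row : Prop := ∀ (row_chunk : String), Dom_split_tabular_row row_chunk → Spec_split_tabular_row row_chunk (split_tabular_row row_chunk)

-- ===== LEMMAS AND PROOFS =====

-- canonical splitter: state = "previous character was a backslash"; returns (first cell, later cells)
def pvCanon : Bool → List Char → List Char × List (List Char)
  | _, [] => ([], [])
  | esc, c :: rest =>
    if c = '&' ∧ esc = false then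
      let r := pvCanon false rest
      ([], r.1 :: r.2)
    else
      let r := pvCanon (c == '\\') rest
      (c :: r.1, r.2)

-- B's merge loop, rephrased with the last cell carried separately
def pvMergeGo : List Char → List (List Char) → List (List Char)
  | acc, [] => [acc]
  | acc, p :: ps =>
    if PySem.Chars.endswith acc ['\\'] then pvMergeGo (acc ++ '&' :: p) ps
    else acc :: pvMergeGo p ps

theorem pvEndswith_backslash (l : List Char) :
    PySem.Chars.endswith l ['\\'] = (l.getLast? == some '\\') := by
  rw [Bool.eq_iff_iff, PySem.Chars.endswith_iff, beq_iff_eq, List.getLast?_eq_some_iff]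
  constructor
  · rintro ⟨s, rfl⟩; exact ⟨s, rfl⟩
  · rintro ⟨s, rfl⟩; exact ⟨s, rfl⟩

theorem pvFoldl_mergeGo (ps : List (List Char)) :
    ∀ (cells : List (List Char)) (acc : List Char),
    List.foldl pvMergeStep (cells ++ [acc]) ps = cells ++ pvMergeGo acc ps := by
  induction ps with
  | nil => intro cells acc; rfl
  | cons p ps ih =>
    intro cells acc
    simp only [List.foldl_cons, pvMergeGo, pvMergeStep, List.getLastD_concat, List.dropLast_concat]
    by_cases h : PySem.Chars.endswith acc ['\\'] = true
    · simp only [h, if_true, ih cells (acc ++ '&' :: p)]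
    · simp only [h, Bool.false_eq_true, if_false]
      rw [show cells ++ [acc] ++ [p] = (cells ++ [acc]) ++ [p] by simp,
          ih (cells ++ [acc]) p]
      simp

theorem pvMergeGo_canon (cs : List Char) :
    ∀ (acc : List Char),
    pvMergeGo (acc ++ (cs.splitOn '&').headD []) ((cs.splitOn '&').tail)
      = (acc ++ (pvCanon (acc.getLast? == some '\\') cs).1)
        :: (pvCanon (acc.getLast? == some '\\') cs).2 := by
  induction cs with
  | nil => intro acc; simp [List.splitOn, List.splitOnP_nil, pvMergeGo, pvCanon]
  | cons c cs ih =>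
    intro acc
    simp only [List.splitOn] at *
    rw [List.splitOnP_cons]
    obtain ⟨q0, qs, hq⟩ := List.exists_cons_of_ne_nil (List.splitOnP_ne_nil (· == '&') cs)
    by_cases hc : c = '&'
    · simp only [hc, beq_self_eq_true, if_true, List.headD_cons, List.tail_cons, List.append_nil]
      by_cases hesc : (acc.getLast? == some '\\') = true
      · -- escaped '&': B merges, canon keeps scanning the same cell
        rw [hq, pvMergeGo]
        rw [if_pos (by rw [pvEndswith_backslash]; exact hesc)]
        have h1 := ih (acc ++ ['&'])
        rw [hq] at h1
        simp only [List.headD_cons, List.tail_cons, List.append_assoc,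
          List.singleton_append, List.getLast?_concat] at h1
        rw [h1]
        have hl : acc.getLast? = some '\\' := by simpa using hesc
        simp [pvCanon, hl]
      · -- unescaped '&': B starts a new cell, canon splits
        rw [hq, pvMergeGo]
        rw [if_neg (by rw [pvEndswith_backslash]; exact hesc)]
        have h1 := ih []
        rw [hq] at h1
        simp only [List.headD_cons, List.tail_cons, List.nil_append, List.getLast?_nil] at h1
        rw [h1]
        have hl : ¬ acc.getLast? = some '\\' := by simpa using hesc
        simp [pvCanon, hl]
    · -- ordinary character: prepended to the first piece on both sides
      rw [if_neg (by simpa using hc), hq]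
      simp only [List.modifyHead_cons, List.headD_cons, List.tail_cons]
      have h1 := ih (acc ++ [c])
      rw [hq] at h1
      simp only [List.headD_cons, List.tail_cons, List.append_assoc,
        List.singleton_append, List.getLast?_concat] at h1
      rw [h1]
      simp [pvCanon, hc]

theorem pvFoldA (rest : List Char) :
    ∀ (pref : List Char) (cells : List String) (cur : List Char),
    (let st := List.foldl (pvStepA (pref ++ rest)) (cells, cur)
        (PySem.List.enumerate rest (pref.length : Int))
     st.1 ++ [String.ofList st.2])
      = cells ++ (String.ofList (cur ++ (pvCanon (pref.getLast? == some '\\') rest).1)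
          :: ((pvCanon (pref.getLast? == some '\\') rest).2).map String.ofList) := by
  induction rest with
  | nil => intro pref cells cur; simp [PySem.List.enumerate_nil, pvCanon]
  | cons c rest ih =>
    intro pref cells cur
    rw [PySem.List.enumerate_cons]
    simp only [List.foldl_cons]
    -- A's test on this character is exactly "c is '&' and the previous char is not a backslash"
    have hcond : (c = '&' ∧ ((pref.length : Int) = 0 ∨
        PySem.List.pyGet? (pref ++ c :: rest) ((pref.length : Int) - 1) ≠ some '\\'))
        ↔ (c = '&' ∧ (pref.getLast? == some '\\') = false) := by
      rcases List.eq_nil_or_concat pref with rfl | ⟨p', x, rfl⟩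
      · simp
      · simp only [List.concat_eq_append]
        have hget : PySem.List.pyGet? (p' ++ [x] ++ (c :: rest))
            (((p' ++ [x]).length : Int) - 1) = some x := by
          have hlen : (((p' ++ [x]).length : Int) - 1) = ((p'.length : Nat) : Int) := by
            simp
          rw [hlen, PySem.List.pyGet?_natCast, List.append_assoc,
            List.getElem?_append_right (le_refl _)]
          simp
        rw [hget, List.getLast?_concat]
        constructor
        · rintro ⟨hc, (h0 | hne)⟩
          · have h0' : (p' ++ [x]).length = 0 := by exact_mod_cast h0
            simp at h0'
          · exact ⟨hc, by simpa using fun hx => hne (by rw [hx])⟩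
        · rintro ⟨hc, hf⟩
          refine ⟨hc, Or.inr fun hsome => ?_⟩
          have hx : x = '\\' := by injection hsome
          simp [hx] at hf
    have harr : pref ++ c :: rest = (pref ++ [c]) ++ rest := by simp
    have hlen1 : (pref.length : Int) + 1 = (((pref ++ [c]).length : Nat) : Int) := by
      simp
    by_cases hif : c = '&' ∧ (pref.getLast? == some '\\') = false
    · simp only [pvStepA]
      rw [if_pos (hcond.mpr hif)]
      rw [hlen1, harr, ih (pref ++ [c]) (cells ++ [String.ofList cur]) []]
      obtain ⟨hc, hesc⟩ := hif
      simp [pvCanon, hc, hesc]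
    · simp only [pvStepA]
      rw [if_neg (fun h => hif (hcond.mp h))]
      rw [hlen1, harr, ih (pref ++ [c]) cells (cur ++ [c])]
      have hcanon : pvCanon (pref.getLast? == some '\\') (c :: rest)
          = (c :: (pvCanon (c == '\\') rest).1, (pvCanon (c == '\\') rest).2) := by
        rw [pvCanon, if_neg hif]
      rw [hcanon]
      simp

-- ===== VERDICT (by name: the statement is the Claim_ definition above) =====
theorem split_tabular_row_spec : Claim_equal_split_tabular_row := by
  intro s _
  show split_tabular_row s = split_tabular_row_alt s
  obtain ⟨p0, rest, hq⟩ := List.exists_cons_of_ne_nil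
    (show s.toList.splitOn '&' ≠ [] by rw [List.splitOn]; exact List.splitOnP_ne_nil _ _)
  have hA := pvFoldA s.toList [] [] []
  simp only [List.nil_append, List.length_nil, Nat.cast_zero, List.getLast?_nil] at hA
  have hB := pvMergeGo_canon s.toList []
  rw [hq] at hB
  simp only [List.headD_cons, List.tail_cons, List.nil_append, List.getLast?_nil] at hB
  have hBfold : List.foldl pvMergeStep [p0] rest = pvMergeGo p0 rest := by
    simpa using pvFoldl_mergeGo rest [] p0
  have hAlt : split_tabular_row_alt s = (List.foldl pvMergeStep [p0] rest).map String.ofList := by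
    unfold split_tabular_row_alt
    rw [hq]
  rw [hAlt, hBfold, hB]
  exact hA.trans (by simp)
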